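-- pv_equiv track=rewrite | github.com/WonilLee211/TIL | Algorithm/programmers/Combination_implemetation.py | solution
-- ===== SOURCE A (Python) =====
-- def make_team(participants, weight_participants, weight, answer):
--     m = len(participants)
--
--     if answer[0] > m: # 현재 답의 참여 인원이 주어진 participants보다 많은 경우 제외
--         return answer
--
--     for r in range(1, 1 << m):
--
--         # 팀 나누기
--         team_a = []
--         for c in range(m):
--             if r & (1 << c):
--                 team_a.append(weight[participants[c]])
--
--         if len(team_a) in [0, m]: # 한 팀으로 모두 몰린 경우 제외
--             continue
--
--         weight_team_a = sum(team_a)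
--         # 팀별 몸무게 총합이 같고, 현재 한 팀의 몸무게가 답보다 클 경우 갱신
--         if weight_team_a == (weight_participants - weight_team_a) and answer[1] < weight_team_a:
--             answer = [m, weight_team_a]
--
--     return answer
--
-- def solution(weight):
--
--     n = len(weight)
--     answer = [0, 0]
--
--     for i in range((1 << n) - 1, 0, -1): # 참가 인원이 가장 많은 경우부터 보기
--
--         participants = []
--         weight_participants = 0
--
--         # 참가 인원 인덱스 구하기
--         for j in range(n):
--             if i & (1 << j):
--                 participants.append(j)
--                 weight_participants += weight[j]
--
--         # 참가 인원별 팀 구성 후 answer 갱신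
--         answer = make_team(participants, weight_participants, weight, answer)
--
--     return answer
-- ===== SOURCE B (Python) =====
-- def solution(weight):
--     n = len(weight)
--     best = [0, 0]
--     for mask in range((1 << n) - 1, 0, -1):
--         ws = [weight[j] for j in range(n) if mask >> j & 1]
--         m = len(ws)
--         if m < best[0] or m < 2:
--             continue
--         total = sum(ws)
--         if total % 2:
--             continue
--         half = total // 2
--         if half <= best[1]:
--             continue
--         # achievable sums of nonempty subsets of ws[1:]; a proper nonempty
--         # split with equal halves exists iff `half` is among them
--         sums = set()
--         for w in ws[1:]:
--             sums |= {s + w for s in sums} | {w}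
--         if half in sums:
--             best = [m, half]
--     return best
-- ===== Notes on version B (the rewrite author's own statement) =====
-- stated objective: alternative
-- what changed: Per candidate subset, A enumerates all 2^m sub-splits to find an equal-weight two-team partition; B instead builds the deduplicated set of nonempty subset sums of the tail (an equal split exists iff total/2 is in it) and skips subsets with odd total or half-weight not above the current answer before doing any inner work.
import Mathlib
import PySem

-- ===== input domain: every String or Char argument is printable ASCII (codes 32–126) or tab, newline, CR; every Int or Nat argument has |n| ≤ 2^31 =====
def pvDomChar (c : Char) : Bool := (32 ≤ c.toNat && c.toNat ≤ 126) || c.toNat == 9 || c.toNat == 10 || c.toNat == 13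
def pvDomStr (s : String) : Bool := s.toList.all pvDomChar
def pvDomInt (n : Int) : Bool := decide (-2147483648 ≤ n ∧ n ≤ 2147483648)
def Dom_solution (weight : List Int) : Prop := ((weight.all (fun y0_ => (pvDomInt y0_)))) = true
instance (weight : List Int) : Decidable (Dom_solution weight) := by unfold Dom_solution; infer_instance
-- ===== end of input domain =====

-- B replaces A's per-subset 2^m enumeration of team splits by a deduplicated subset-sums
-- set with parity/threshold pruning; same return value on every input.

-- ===== PORT A =====
-- literal port of make_team; the indexings answer[0], answer[1], weight[...], participants[c]
-- are always in range in A, ported as pyGetD with default 0 (exact here)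
def makeTeam (participants : List Int) (weightParticipants : Int) (weight : List Int) (answer : List Int) : List Int :=
  let m : Int := participants.length
  if PySem.List.pyGetD answer 0 0 > m then answer
  else
    (PySem.List.pyRange 1 ((1:Int) <<< participants.length) 1).foldl (fun answer r =>
      let teamA : List Int := (PySem.List.pyRange 0 m 1).foldl (fun t c =>
        if PySem.Int.band r ((1:Int) <<< c.toNat) ≠ 0 then
          t ++ [PySem.List.pyGetD weight (PySem.List.pyGetD participants c 0) 0]
        else t) []
      if (teamA.length : Int) ∈ ([0, m] : List Int) then answer
      else
        let weightTeamA := teamA.sum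
        if weightTeamA = weightParticipants - weightTeamA ∧ PySem.List.pyGetD answer 1 0 < weightTeamA then
          [m, weightTeamA]
        else answer) answer

def solution (weight : List Int) : List Int :=
  let n := weight.length
  (PySem.List.pyRange ((1:Int) <<< n - 1) 0 (-1)).foldl (fun answer i =>
    let pw := (PySem.List.pyRange 0 (n:Int) 1).foldl
      (fun (s : List Int × Int) j =>
        if PySem.Int.band i ((1:Int) <<< j.toNat) ≠ 0 then
          (s.1 ++ [j], s.2 + PySem.List.pyGetD weight j 0)
        else s) ([], 0)
    makeTeam pw.1 pw.2 weight answer) [0, 0]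

-- ===== PORT B =====
-- literal port of Source B; mask >> j and 1 << n are shifts of nonnegative ints (exact)
def solution_alt (weight : List Int) : List Int :=
  let n := weight.length
  (PySem.List.pyRange ((1:Int) <<< n - 1) 0 (-1)).foldl (fun best mask =>
    let ws : List Int := (PySem.List.pyRange 0 (n:Int) 1).foldl (fun acc j =>
      if PySem.Int.band (mask >>> j.toNat) 1 ≠ 0 then acc ++ [PySem.List.pyGetD weight j 0] else acc) []
    let m : Int := ws.length
    if m < PySem.List.pyGetD best 0 0 ∨ m < 2 then best
    else if PySem.Int.mod ws.sum 2 ≠ 0 then best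
    else
      let half := PySem.Int.floordiv ws.sum 2
      if half ≤ PySem.List.pyGetD best 1 0 then best
      else
        let sums : PySem.Set Int := (PySem.List.slice ws (some 1) none).foldl
          (fun s w => PySem.Set.union (PySem.Set.union s (s.map (· + w))) [w]) PySem.Set.empty
        if PySem.Set.contains sums half then [m, half] else best) [0, 0]


-- ===== PRECONDITION & SPEC =====
def Spec_solution (weight : List Int) (out : List Int) : Prop := out = solution_alt weight
instance (weight : List Int) (out : List Int) : Decidable (Spec_solution weight out) := by unfold Spec_solution; infer_instance

-- ===== CLAIM (what is proved, stated in full; the proofs are below) =====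
def Claim_equal_solution : Prop := ∀ (weight : List Int), Dom_solution weight → Spec_solution weight (solution weight)

-- ===== LEMMAS AND PROOFS =====

-- the sublist of xs selected by the set bits of r
def bsel : Nat → List Int → List Int
  | _, [] => []
  | r, w :: ws => (if r % 2 = 1 then [w] else []) ++ bsel (r / 2) ws

-- x is the sum of some nonempty sublist of l
def NS (l : List Int) (x : Int) : Prop := ∃ t, t.Sublist l ∧ t ≠ [] ∧ t.sum = x

theorem bsel_zero (l : List Int) : bsel 0 l = [] := by
  induction l <;> simp [bsel, *]

theorem bsel_sublist (r : Nat) (l : List Int) : (bsel r l).Sublist l := by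
  induction l generalizing r with
  | nil => simp [bsel]
  | cons w ws ih =>
    simp only [bsel]
    split
    · exact List.Sublist.cons₂ w (ih (r / 2))
    · simp only [List.nil_append]
      exact (ih (r / 2)).trans (List.sublist_cons_self w ws)

theorem bsel_ne_nil (r : Nat) (l : List Int) (h1 : 1 ≤ r) (h2 : r < 2 ^ l.length) :
    bsel r l ≠ [] := by
  induction l generalizing r with
  | nil => simp at h2; omega
  | cons w ws ih =>
    simp only [bsel]
    by_cases hp : r % 2 = 1
    · simp [hp]
    · simp only [hp, if_false, List.nil_append]
      apply ih
      · omega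
      · simp only [List.length_cons, pow_succ] at h2; omega

theorem bsel_surj (t l : List Int) (h : t.Sublist l) :
    ∃ r, r < 2 ^ l.length ∧ bsel r l = t := by
  induction h with
  | slnil => exact ⟨0, by simp [bsel]⟩
  | @cons t l a _ ih =>
    obtain ⟨r, hr, he⟩ := ih
    refine ⟨2 * r, ?_, ?_⟩
    · simp only [List.length_cons, pow_succ]; omega
    · simp only [bsel]
      have h1 : 2 * r % 2 = 0 := by omega
      have h2 : 2 * r / 2 = r := by omega
      simp [h1, h2, he]
  | @cons₂ t l a _ ih =>
    obtain ⟨r, hr, he⟩ := ih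
    refine ⟨2 * r + 1, ?_, ?_⟩
    · simp only [List.length_cons, pow_succ]; omega
    · simp only [bsel]
      have h1 : (2 * r + 1) % 2 = 1 := by omega
      have h2 : (2 * r + 1) / 2 = r := by omega
      simp [h1, h2, he]

theorem bsel_append (r : Nat) (l : List Int) (w : Int) :
    bsel r (l ++ [w]) = bsel r l ++ (if r / 2 ^ l.length % 2 = 1 then [w] else []) := by
  induction l generalizing r with
  | nil => simp [bsel]
  | cons a l ih =>
    simp only [List.cons_append, bsel, ih (r / 2), List.length_cons, List.append_assoc]
    rw [Nat.div_div_eq_div_mul, ← pow_succ']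
    rfl

-- the filtered-range selection the ports produce equals bsel
theorem bsel_eq (xs : List Int) (r : Nat) :
    ((PySem.List.pyRange 0 (xs.length : Int) 1).filter
        (fun c => decide (r / 2 ^ c.toNat % 2 = 1))).map (fun c => PySem.List.pyGetD xs c 0)
      = bsel r xs := by
  induction xs using List.reverseRecOn with
  | nil => simp [bsel, PySem.List.pyRange_one_eq_nil]
  | append_singleton xs w ih =>
    have hlen : ((xs ++ [w]).length : Int) = (xs.length : Int) + 1 := by simp
    rw [hlen, PySem.List.pyRange_one_succ_right (by positivity), List.filter_append,
      List.map_append, bsel_append, ← ih]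
    congr 1
    · apply List.map_congr_left
      intro c hc
      have hc' := List.mem_filter.mp hc |>.1
      rw [PySem.List.mem_pyRange_one] at hc'
      rw [PySem.List.pyGetD_eq_getElem (xs ++ [w]) 0 (by omega) (by simp; omega),
          PySem.List.pyGetD_eq_getElem xs 0 (by omega) (by exact_mod_cast hc'.2)]
      rw [List.getElem_append_left]
    · have ht : ((xs.length : Int)).toNat = xs.length := by omega
      simp only [List.filter_singleton, ht]
      by_cases hb : r / 2 ^ xs.length % 2 = 1
      · simp only [hb, decide_true, cond_true, List.map_cons, List.map_nil]
        congr 1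
        rw [PySem.List.pyGetD_eq_getElem (xs ++ [w]) 0 (by omega) (by simp)]
        simp [ht]
      · simp [hb]

theorem NS_cons (w : Int) (l : List Int) (x : Int) :
    NS (w :: l) x ↔ NS l x ∨ x = w ∨ NS l (x - w) := by
  unfold NS
  constructor
  · rintro ⟨t, hs, hne, hsum⟩
    rcases List.sublist_cons_iff.mp hs with h | ⟨r, rfl, hr⟩
    · exact Or.inl ⟨t, h, hne, hsum⟩
    · rcases r with _ | ⟨a, r'⟩
      · simp at hsum; tauto
      · refine Or.inr (Or.inr ⟨a :: r', hr, by simp, ?_⟩)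
        simp only [List.sum_cons] at hsum ⊢; linarith
  · rintro (⟨t, hs, hne, hsum⟩ | h | ⟨t, hs, hne, hsum⟩)
    · exact ⟨t, hs.trans (List.sublist_cons_self w l), hne, hsum⟩
    · exact ⟨[w], by simp, by simp, by simp [h]⟩
    · exact ⟨w :: t, List.Sublist.cons₂ w hs, by simp, by simp [hsum]⟩

theorem sums_mem (l : List Int) (s : PySem.Set Int) (x : Int) :
    (x ∈ l.foldl (fun s w => PySem.Set.union (PySem.Set.union s (s.map (· + w))) [w]) s)
      ↔ x ∈ s ∨ NS l x ∨ ∃ y ∈ s, NS l (x - y) := by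
  induction l generalizing s with
  | nil => simp [NS]
  | cons w l ih =>
    simp only [List.foldl_cons, ih, PySem.Set.mem_union, List.mem_map, NS_cons,
      List.mem_singleton]
    constructor
    · rintro ((((hx | ⟨a, ha, rfl⟩) | rfl) | h | ⟨y, ((hy | ⟨a, ha, rfl⟩) | rfl), hns⟩))
      · exact Or.inl hx
      · refine Or.inr (Or.inr ⟨a, ha, Or.inr (Or.inl (by ring))⟩)
      · exact Or.inr (Or.inl (Or.inr (Or.inl rfl)))
      · exact Or.inr (Or.inl (Or.inl h))
      · exact Or.inr (Or.inr ⟨y, hy, Or.inl hns⟩)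
      · refine Or.inr (Or.inr ⟨a, ha, Or.inr (Or.inr ?_)⟩)
        have : x - a - w = x - (a + w) := by ring
        rwa [this]
      · exact Or.inr (Or.inl (Or.inr (Or.inr hns)))
    · rintro (hx | (h | h | h) | ⟨y, hy, (h | h | h)⟩)
      · exact Or.inl (Or.inl (Or.inl hx))
      · exact Or.inr (Or.inl h)
      · exact Or.inl (Or.inr h)
      · exact Or.inr (Or.inr ⟨w, Or.inr rfl, h⟩)
      · exact Or.inr (Or.inr ⟨y, Or.inl (Or.inl hy), h⟩)
      · exact Or.inl (Or.inl (Or.inr ⟨y, hy, by omega⟩))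
      · refine Or.inr (Or.inr ⟨y + w, Or.inl (Or.inr ⟨y, hy, rfl⟩), ?_⟩)
        have : x - (y + w) = x - y - w := by ring
        rwa [this]

theorem sums_spec (l : List Int) (x : Int) :
    (x ∈ l.foldl (fun s w => PySem.Set.union (PySem.Set.union s (s.map (· + w))) [w])
        PySem.Set.empty) ↔ NS l x := by
  have := sums_mem l PySem.Set.empty x
  simpa [PySem.Set.empty] using this

theorem sublist_compl (t l : List Int) (h : t.Sublist l) :
    ∃ u : List Int, u.Sublist l ∧ t.sum + u.sum = l.sum ∧ t.length + u.length = l.length := by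
  induction h with
  | slnil => exact ⟨([] : List Int), List.Sublist.slnil, by simp, by simp⟩
  | @cons t l a _ ih =>
    obtain ⟨u, hu, hs, hl⟩ := ih
    refine ⟨a :: u, List.Sublist.cons₂ a hu, ?_, ?_⟩
    · simp only [List.sum_cons]; linarith
    · simp only [List.length_cons]; omega
  | @cons₂ t l a _ ih =>
    obtain ⟨u, hu, hs, hl⟩ := ih
    refine ⟨u, hu.trans (List.sublist_cons_self a l), ?_, ?_⟩
    · simp only [List.sum_cons]; linarith
    · simp only [List.length_cons]; omega

theorem split_iff (w : Int) (rest : List Int) (S : Int) (hS : S = w + rest.sum) :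
    (∃ t : List Int, t.Sublist (w :: rest) ∧ t ≠ [] ∧ t ≠ w :: rest ∧ 2 * t.sum = S)
      ↔ (∃ t : List Int, t.Sublist rest ∧ t ≠ [] ∧ 2 * t.sum = S) := by
  constructor
  · rintro ⟨t, hs, hne, hnf, hsum⟩
    rcases List.sublist_cons_iff.mp hs with h | ⟨r, rfl, hr⟩
    · exact ⟨t, h, hne, hsum⟩
    · obtain ⟨u, hu, hus, hul⟩ := sublist_compl r rest hr
      refine ⟨u, hu, ?_, ?_⟩
      · intro hnil
        subst hnil
        simp only [List.length_nil] at hul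
        have := List.Sublist.eq_of_length hr (by omega)
        exact hnf (by rw [this])
      · simp only [List.sum_cons] at hsum
        linarith
  · rintro ⟨t, hs, hne, hsum⟩
    refine ⟨t, hs.trans (List.sublist_cons_self w rest), hne, ?_, hsum⟩
    intro heq
    have := List.Sublist.length_le hs
    rw [heq] at this
    simp at this

-- A's inner loop: every successful update writes the same pair [m, h]
theorem foldl_ite_update (l : List Int) (m h : Int) (v : Int → Int) (cond : Int → Prop)
    [DecidablePred cond] (hv : ∀ r ∈ l, cond r → v r = h) (ans : List Int) :
    l.foldl (fun a r => if cond r ∧ PySem.List.pyGetD a 1 0 < v r then [m, v r] else a) ans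
      = if (∃ r ∈ l, cond r) ∧ PySem.List.pyGetD ans 1 0 < h then [m, h] else ans := by
  induction l generalizing ans with
  | nil => simp
  | cons r l ih =>
    simp only [List.foldl_cons, List.mem_cons] at *
    by_cases hc : cond r
    · have hvr : v r = h := hv r (Or.inl rfl) hc
      by_cases hlt : PySem.List.pyGetD ans 1 0 < h
      · rw [if_pos (by rw [hvr]; exact ⟨hc, hlt⟩)]
        rw [ih (fun x hx => hv x (Or.inr hx)) [m, v r]]
        have hget : PySem.List.pyGetD ([m, v r] : List Int) 1 0 = h := by
          rw [hvr]; simp [PySem.List.pyGetD]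
        rw [hget, hvr]
        simp [hc, hlt]
      · rw [if_neg (by rw [hvr]; tauto)]
        rw [ih (fun x hx => hv x (Or.inr hx)) ans]
        by_cases he : ∃ x ∈ l, cond x <;> simp [he, hc, hlt]
    · rw [if_neg (by tauto)]
      rw [ih (fun x hx => hv x (Or.inr hx)) ans]
      by_cases he : ∃ x ∈ l, cond x <;> simp [he, hc]

-- the submasks r ∈ [1, 2^len) are exactly the nonempty sublists
theorem exists_mask_iff (ws : List Int) (P : List Int → Prop) :
    (∃ r ∈ PySem.List.pyRange 1 ((1:Int) <<< ws.length) 1, P (bsel r.toNat ws))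
      ↔ ∃ t : List Int, t.Sublist ws ∧ t ≠ [] ∧ P t := by
  have hpow : ((1:Int) <<< ws.length) = (2:Int) ^ ws.length := by simp [Int.shiftLeft_eq]
  constructor
  · rintro ⟨r, hr, hp⟩
    rw [PySem.List.mem_pyRange_one] at hr
    refine ⟨bsel r.toNat ws, bsel_sublist _ _, ?_, hp⟩
    apply bsel_ne_nil
    · omega
    · rw [hpow] at hr
      have : (r.toNat : Int) < (2:Int) ^ ws.length := by omega
      exact_mod_cast this
  · rintro ⟨t, hs, hne, hp⟩
    obtain ⟨r, hr, he⟩ := bsel_surj t ws hs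
    have hr1 : 1 ≤ r := by
      rcases Nat.eq_zero_or_pos r with h0 | h1
      · subst h0; rw [bsel_zero] at he; exact absurd he.symm hne
      · exact h1
    refine ⟨(r : Int), ?_, ?_⟩
    · rw [PySem.List.mem_pyRange_one, hpow]
      constructor
      · exact_mod_cast hr1
      · exact_mod_cast hr
    · simpa [he]

-- Python `i & (1 << j)` / `(mask >> j) & 1` tests (nonnegative operands), as a bit of the Nat
theorem testA (r : Int) (hr : 0 ≤ r) (j : Int) :
    (PySem.Int.band r ((1:Int) <<< (j.toNat : Int)) ≠ 0) ↔ r.toNat / 2 ^ j.toNat % 2 = 1 := by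
  rw [Int.shiftLeft_natCast_right]
  have h1 : (1:Int) <<< j.toNat = ((2 ^ j.toNat : Nat) : Int) := by
    simp [Int.shiftLeft_eq]
  rw [h1]
  rw [PySem.Int.band_of_nonneg hr (by positivity)]
  have ht : (((2 ^ j.toNat : Nat) : Int)).toNat = 2 ^ j.toNat := Int.toNat_natCast _
  rw [ht, Nat.and_two_pow, Nat.testBit_eq_decide_div_mod_eq]
  by_cases hb : r.toNat / 2 ^ j.toNat % 2 = 1 <;> simp [hb]

theorem testB (mask : Int) (hm : 0 ≤ mask) (c : Nat) :
    (PySem.Int.band (mask >>> c) 1 ≠ 0) ↔ mask.toNat / 2 ^ c % 2 = 1 := by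
  have h1 : mask >>> c = ((mask.toNat >>> c : Nat) : Int) := by
    conv_lhs => rw [show mask = ((mask.toNat : Nat) : Int) by omega]
    simp [Int.shiftRight_eq_div_pow, Nat.shiftRight_eq_div_pow]
  rw [h1, show (1:Int) = ((1:Nat) : Int) from rfl, PySem.Int.band_natCast,
    Nat.and_one_is_mod, Nat.shiftRight_eq_div_pow]
  omega

theorem floordiv_double (v : Int) : PySem.Int.floordiv (2 * v) 2 = v := by
  rw [PySem.Int.floordiv_eq_ediv_of_pos (by omega)]
  omega

-- selection fold canonicalization, A side (pair) and B side (list)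
theorem selA_eq (weight : List Int) (i : Int) (hi : 0 ≤ i) :
    (PySem.List.pyRange 0 (weight.length : Int) 1).foldl
      (fun (s : List Int × Int) j =>
        if PySem.Int.band i ((1:Int) <<< (j.toNat : Int)) ≠ 0 then
          (s.1 ++ [j], s.2 + PySem.List.pyGetD weight j 0)
        else s) ([], 0)
    = ((PySem.List.pyRange 0 (weight.length : Int) 1).filter
          (fun j => decide (i.toNat / 2 ^ j.toNat % 2 = 1)),
       (((PySem.List.pyRange 0 (weight.length : Int) 1).filter
          (fun j => decide (i.toNat / 2 ^ j.toNat % 2 = 1))).map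
            (fun j => PySem.List.pyGetD weight j 0)).sum) := by
  have h1 := PySem.List.foldl_congr_mem (PySem.List.pyRange 0 (weight.length : Int) 1)
    (fun (s : List Int × Int) j =>
        if PySem.Int.band i ((1:Int) <<< (j.toNat : Int)) ≠ 0 then
          (s.1 ++ [j], s.2 + PySem.List.pyGetD weight j 0)
        else s)
    (fun (s : List Int × Int) j =>
        ((fun (t : List Int) (j : Int) => if i.toNat / 2 ^ j.toNat % 2 = 1 then t ++ [j] else t) s.1 j,
         (fun (a : Int) (j : Int) => if i.toNat / 2 ^ j.toNat % 2 = 1 then a + PySem.List.pyGetD weight j 0 else a) s.2 j))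
    ([], 0)
    (by
      intro acc j hj
      by_cases hb : i.toNat / 2 ^ j.toNat % 2 = 1
      · simp only [if_pos ((testA i hi j).mpr hb), if_pos hb]
      · simp only [if_neg (fun hc => hb ((testA i hi j).mp hc)), if_neg hb])
  rw [h1, PySem.List.foldl_prod_mk
    (f := fun (t : List Int) (j : Int) => if i.toNat / 2 ^ j.toNat % 2 = 1 then t ++ [j] else t)
    (g := fun (a : Int) (j : Int) => if i.toNat / 2 ^ j.toNat % 2 = 1 then a + PySem.List.pyGetD weight j 0 else a)]
  refine Prod.ext ?_ ?_
  · show List.foldl _ _ _ = _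
    exact (PySem.List.foldl_append_ite_eq_filter _ _ _).trans (by simp)
  · show List.foldl _ _ _ = _
    rw [PySem.List.foldl_ite_eq_foldl_filter
          (p := fun j : Int => i.toNat / 2 ^ j.toNat % 2 = 1)
          (f := fun (a : Int) (j : Int) => a + PySem.List.pyGetD weight j 0),
        PySem.List.foldl_add]
    simp

theorem teamA_eq (ps weight : List Int) (r : Int) (hr : 0 ≤ r) :
    (PySem.List.pyRange 0 ((ps.length : Int)) 1).foldl (fun t c =>
        if PySem.Int.band r ((1:Int) <<< (c.toNat : Int)) ≠ 0 then
          t ++ [PySem.List.pyGetD weight (PySem.List.pyGetD ps c 0) 0]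
        else t) []
      = bsel r.toNat (ps.map (fun p => PySem.List.pyGetD weight p 0)) := by
  rw [PySem.List.foldl_congr_mem _ _
    (fun (t : List Int) (c : Int) =>
      if r.toNat / 2 ^ c.toNat % 2 = 1 then
        t ++ [PySem.List.pyGetD weight (PySem.List.pyGetD ps c 0) 0] else t) _
    (by
      intro acc c hc
      by_cases hb : r.toNat / 2 ^ c.toNat % 2 = 1
      · simp only [if_pos ((testA r hr c).mpr hb), if_pos hb]
      · simp only [if_neg (fun h => hb ((testA r hr c).mp h)), if_neg hb])]
  rw [PySem.List.foldl_append_ite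
    (p := fun c : Int => r.toNat / 2 ^ c.toNat % 2 = 1)
    (f := fun c : Int => PySem.List.pyGetD weight (PySem.List.pyGetD ps c 0) 0)]
  rw [List.nil_append, ← bsel_eq (ps.map (fun p => PySem.List.pyGetD weight p 0)) r.toNat]
  rw [List.length_map]
  apply List.map_congr_left
  intro c hc
  have hc' := PySem.List.mem_pyRange_one.mp (List.mem_filter.mp hc).1
  rw [PySem.List.pyGetD_eq_getElem ps 0 (by omega) (by omega),
      PySem.List.pyGetD_eq_getElem (ps.map (fun p => PySem.List.pyGetD weight p 0)) 0
        (by omega) (by rw [List.length_map]; omega),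
      List.getElem_map]

theorem makeTeam_eq (ps weight ans : List Int) :
    makeTeam ps ((ps.map (fun p => PySem.List.pyGetD weight p 0)).sum) weight ans =
      (if PySem.List.pyGetD ans 0 0 > (ps.length : Int) then ans
       else
         let ws := ps.map (fun p => PySem.List.pyGetD weight p 0)
         if (∃ r ∈ PySem.List.pyRange 1 ((1:Int) <<< ws.length) 1,
               bsel r.toNat ws ≠ [] ∧ bsel r.toNat ws ≠ ws ∧ 2 * (bsel r.toNat ws).sum = ws.sum) ∧
             PySem.List.pyGetD ans 1 0 < PySem.Int.floordiv ws.sum 2 then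
           [(ps.length : Int), PySem.Int.floordiv ws.sum 2]
         else ans) := by
  set g : Int → Int := fun p => PySem.List.pyGetD weight p 0 with hg
  set ws : List Int := ps.map g with hws
  unfold makeTeam
  simp only []
  by_cases h0 : PySem.List.pyGetD ans 0 0 > (ps.length : Int)
  · rw [if_pos h0, if_pos h0]
  · rw [if_neg h0, if_neg h0]
    have hlenn : ws.length = ps.length := by rw [hws, List.length_map]
    have hlen : (ws.length : Int) = (ps.length : Int) := by rw [hlenn]
    refine Eq.trans (PySem.List.foldl_congr_mem _ _
      (fun answer r =>
        if (bsel r.toNat ws ≠ [] ∧ bsel r.toNat ws ≠ ws ∧ 2 * (bsel r.toNat ws).sum = ws.sum) ∧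
            PySem.List.pyGetD answer 1 0 < (bsel r.toNat ws).sum then
          [(ps.length : Int), (bsel r.toNat ws).sum]
        else answer)
      ans ?_) ?_
    · intro acc r hrmem
      have hr1 := PySem.List.mem_pyRange_one.mp hrmem
      have hr0 : 0 ≤ r := by omega
      simp only [teamA_eq ps weight r hr0, ← hws, ← hg]
      have hsub := bsel_sublist r.toNat ws
      have hlen_le := List.Sublist.length_le hsub
      have hmem_iff : ((((bsel r.toNat ws).length : Int)) ∈ ([0, (ps.length : Int)] : List Int))
          ↔ (bsel r.toNat ws = [] ∨ bsel r.toNat ws = ws) := by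
        simp only [List.mem_cons, List.not_mem_nil, or_false]
        constructor
        · rintro (h | h)
          · left; exact List.eq_nil_of_length_eq_zero (by omega)
          · right; exact List.Sublist.eq_of_length hsub (by omega)
        · rintro (h | h)
          · left; rw [h]; simp
          · right; rw [h, hlen]
      by_cases hmem : bsel r.toNat ws = [] ∨ bsel r.toNat ws = ws
      · rw [if_pos (hmem_iff.mpr hmem), if_neg (by tauto)]
      · rw [if_neg (fun hx => hmem (hmem_iff.mp hx))]
        by_cases hs : (bsel r.toNat ws).sum = ws.sum - (bsel r.toNat ws).sum ∧
            PySem.List.pyGetD acc 1 0 < (bsel r.toNat ws).sum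
        · rw [if_pos hs, if_pos (by push Not at hmem; exact ⟨⟨hmem.1, hmem.2, by omega⟩, hs.2⟩)]
        · rw [if_neg hs, if_neg (by
            rintro ⟨⟨_, _, h2⟩, hlt⟩
            exact hs ⟨by omega, hlt⟩)]
    · rw [foldl_ite_update _ (ps.length : Int) (PySem.Int.floordiv ws.sum 2)
        (fun r => (bsel r.toNat ws).sum)
        (fun r => bsel r.toNat ws ≠ [] ∧ bsel r.toNat ws ≠ ws ∧ 2 * (bsel r.toNat ws).sum = ws.sum)
        (by
          intro r _ hc
          rw [← hc.2.2, floordiv_double])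
        ans]
      rw [show (1:Int) <<< ps.length = (1:Int) <<< ws.length by rw [hlenn]]

theorem selB_eq (weight : List Int) (i : Int) (hi : 0 ≤ i) :
    (PySem.List.pyRange 0 (weight.length : Int) 1).foldl (fun acc j =>
        if PySem.Int.band (i >>> (j.toNat : Nat)) 1 ≠ 0 then acc ++ [PySem.List.pyGetD weight j 0] else acc) []
      = ((PySem.List.pyRange 0 (weight.length : Int) 1).filter
          (fun j => decide (i.toNat / 2 ^ j.toNat % 2 = 1))).map
            (fun j => PySem.List.pyGetD weight j 0) := by
  refine Eq.trans (PySem.List.foldl_congr_mem _ _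
    (fun (acc : List Int) (j : Int) =>
      if i.toNat / 2 ^ j.toNat % 2 = 1 then acc ++ [PySem.List.pyGetD weight j 0] else acc)
    [] ?_) ?_
  · intro acc j hj
    by_cases hb : i.toNat / 2 ^ j.toNat % 2 = 1
    · simp only [if_pos ((testB i hi j.toNat).mpr hb), if_pos hb]
    · simp only [if_neg (fun h => hb ((testB i hi j.toNat).mp h)), if_neg hb]
  · exact (PySem.List.foldl_append_ite _ _ _ _).trans (by simp)

theorem main_eq (weight : List Int) : solution weight = solution_alt weight := by
  unfold solution solution_alt
  simp only []
  apply PySem.List.foldl_congr_mem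
  intro ans i hi
  have hio := PySem.List.mem_pyRange_neg_one.mp hi
  have hi0 : 0 ≤ i := le_of_lt hio.1
  rw [selA_eq weight i hi0, selB_eq weight i hi0]
  simp only []
  rw [makeTeam_eq _ weight ans]
  set g : Int → Int := fun p => PySem.List.pyGetD weight p 0 with hg
  set ps : List Int := (PySem.List.pyRange 0 (weight.length : Int) 1).filter
      (fun j => decide (i.toNat / 2 ^ j.toNat % 2 = 1)) with hps
  set ws : List Int := ps.map g with hws
  have hlenn : ws.length = ps.length := by rw [hws, List.length_map]
  by_cases h0 : PySem.List.pyGetD ans 0 0 > (ps.length : Int)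
  · rw [if_pos h0]
    conv_rhs => rw [if_pos (Or.inl (show (ws.length : Int) < PySem.List.pyGetD ans 0 0 by
      rw [hlenn]; omega))]
  · rw [if_neg h0]
    by_cases hm2 : (ws.length : Int) < 2
    · have hAno : ¬ ((∃ r ∈ PySem.List.pyRange 1 ((1:Int) <<< ws.length) 1,
            bsel r.toNat ws ≠ [] ∧ bsel r.toNat ws ≠ ws ∧ 2 * (bsel r.toNat ws).sum = ws.sum) ∧
          PySem.List.pyGetD ans 1 0 < PySem.Int.floordiv ws.sum 2) := by
        rintro ⟨⟨r, hrmem, hne, hnw, _⟩, _⟩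
        have hsub := bsel_sublist r.toNat ws
        have h1 : 1 ≤ (bsel r.toNat ws).length := by
          cases h : bsel r.toNat ws with
          | nil => exact absurd h hne
          | cons a l => simp
        have h2 := List.Sublist.length_le hsub
        exact hnw (List.Sublist.eq_of_length hsub (by omega))
      rw [if_neg hAno]
      conv_rhs => rw [if_pos (Or.inr hm2)]
    · conv_rhs => rw [if_neg (show ¬ ((ws.length : Int) < PySem.List.pyGetD ans 0 0 ∨
        (ws.length : Int) < 2) by rw [hlenn] at hm2 ⊢; omega)]
      by_cases hodd : PySem.Int.mod ws.sum 2 ≠ 0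
      · have hAno : ¬ ((∃ r ∈ PySem.List.pyRange 1 ((1:Int) <<< ws.length) 1,
              bsel r.toNat ws ≠ [] ∧ bsel r.toNat ws ≠ ws ∧ 2 * (bsel r.toNat ws).sum = ws.sum) ∧
            PySem.List.pyGetD ans 1 0 < PySem.Int.floordiv ws.sum 2) := by
          rintro ⟨⟨r, hrmem, _, _, hsum⟩, _⟩
          exact hodd ((PySem.Int.mod_eq_zero_iff_dvd _ _).mpr ⟨(bsel r.toNat ws).sum, hsum.symm⟩)
        rw [if_neg hAno]
        conv_rhs => rw [if_pos hodd]
      · conv_rhs => rw [if_neg hodd]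
        push Not at hodd
        obtain ⟨k, hk⟩ := (PySem.Int.mod_eq_zero_iff_dvd _ _).mp hodd
        have heven : 2 * PySem.Int.floordiv ws.sum 2 = ws.sum := by
          rw [hk, floordiv_double]
        by_cases hle : PySem.Int.floordiv ws.sum 2 ≤ PySem.List.pyGetD ans 1 0
        · rw [if_neg (fun h => absurd h.2 (by omega))]
          conv_rhs => rw [if_pos hle]
        · conv_rhs => rw [if_neg hle]
          have hwsne : ws ≠ [] := by
            intro h
            rw [h] at hm2
            simp at hm2
          obtain ⟨w, rest, hcons⟩ := List.exists_cons_of_ne_nil hwsne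
          have hAiff : ((∃ r ∈ PySem.List.pyRange 1 ((1:Int) <<< ws.length) 1,
                bsel r.toNat ws ≠ [] ∧ bsel r.toNat ws ≠ ws ∧ 2 * (bsel r.toNat ws).sum = ws.sum) ∧
              PySem.List.pyGetD ans 1 0 < PySem.Int.floordiv ws.sum 2)
              ↔ ((PySem.List.slice ws (some 1) none).foldl
                  (fun s w => PySem.Set.union (PySem.Set.union s (s.map (· + w))) [w])
                  PySem.Set.empty).contains (PySem.Int.floordiv ws.sum 2) = true := by
            rw [PySem.Set.contains_iff, PySem.List.slice_from_one,
              show ws.tail = rest from by simp [hcons], sums_spec]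
            have e1 := exists_mask_iff ws (fun t => t ≠ [] ∧ t ≠ ws ∧ 2 * t.sum = ws.sum)
            have e2 : (∃ t : List Int, t.Sublist ws ∧ t ≠ [] ∧ t ≠ [] ∧ t ≠ ws ∧ 2 * t.sum = ws.sum)
                ↔ (∃ t : List Int, t.Sublist rest ∧ t ≠ [] ∧ 2 * t.sum = ws.sum) := by
              have e2a : (∃ t : List Int, t.Sublist ws ∧ t ≠ [] ∧ t ≠ [] ∧ t ≠ ws ∧ 2 * t.sum = ws.sum)
                  ↔ (∃ t : List Int, t.Sublist (w :: rest) ∧ t ≠ [] ∧ t ≠ w :: rest ∧ 2 * t.sum = ws.sum) := by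
                rw [← hcons]
                constructor
                · rintro ⟨t, h1, h2, _, h4, h5⟩; exact ⟨t, h1, h2, h4, h5⟩
                · rintro ⟨t, h1, h2, h4, h5⟩; exact ⟨t, h1, h2, h2, h4, h5⟩
              rw [e2a]
              exact split_iff w rest ws.sum (by rw [hcons]; simp)
            have e3 : (∃ t : List Int, t.Sublist rest ∧ t ≠ [] ∧ 2 * t.sum = ws.sum)
                ↔ NS rest (PySem.Int.floordiv ws.sum 2) := by
              unfold NS
              apply exists_congr
              intro t
              constructor
              · rintro ⟨h1, h2, h3⟩; exact ⟨h1, h2, by omega⟩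
              · rintro ⟨h1, h2, h3⟩; exact ⟨h1, h2, by omega⟩
            constructor
            · rintro ⟨hex, _⟩; exact e3.mp (e2.mp (e1.mp hex))
            · intro hmem
              exact ⟨e1.mpr (e2.mpr (e3.mpr hmem)), by omega⟩
          by_cases hB : ((PySem.List.slice ws (some 1) none).foldl
              (fun s w => PySem.Set.union (PySem.Set.union s (s.map (· + w))) [w])
              PySem.Set.empty).contains (PySem.Int.floordiv ws.sum 2) = true
          · rw [if_pos (hAiff.mpr hB)]
            conv_rhs => rw [if_pos hB]
            rw [hlenn]
          · rw [if_neg (fun h => hB (hAiff.mp h))]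
            conv_rhs => rw [if_neg hB]

-- ===== VERDICT (by name: the statement is the Claim_ definition above) =====
theorem solution_spec : Claim_equal_solution := by
  intro weight _
  unfold Spec_solution
  exact main_eq weight
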